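-- pv_equiv track=rewrite | github.com/pypi-data/pypi-mirror-385 | packages/testprofiler/testprofiler-1.0.0.tar.gz/testprofiler-1.0.0/src/unittestplus/utils.py | _clean_and_format_definition
-- ===== SOURCE A (Python) =====
-- def _clean_and_format_definition(definition: str) -> str:
--     """
--     Clean and format a function definition string to fix common issues.
--     Specifically handles the format with spaces instead of newlines.
--     """
--     if not definition.strip():
--         raise ValueError("Empty function definition")
--
--     cleaned = definition.replace('\\"', '"').replace("\\'", "'")
--
--     if "\n" not in cleaned:
--         parts = []
--         current_part = ""
--         i = 0
--
--         while i < len(cleaned):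
--
--             if cleaned[i : i + 8] == "        ":
--                 if current_part.strip():
--                     parts.append(current_part.strip())
--                 current_part = ""
--                 i += 8
--                 # Skip any additional spaces
--                 while i < len(cleaned) and cleaned[i] == " ":
--                     i += 1
--             elif (
--                 cleaned[i : i + 12] == "            "
--             ):  # 12 spaces = deeper indentation
--                 if current_part.strip():
--                     parts.append(current_part.strip())
--                 current_part = ""
--                 i += 12
--                 # Skip any additional spaces
--                 while i < len(cleaned) and cleaned[i] == " ":
--                     i += 1
--             else:
--                 current_part += cleaned[i]
--                 i += 1
--
--         if current_part.strip():
--             parts.append(current_part.strip())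
--
--         if parts:
--             formatted_lines = []
--
--             # First part should be the function definition
--             if parts[0].startswith("def "):
--                 formatted_lines.append(parts[0])
--
--                 # Process remaining parts
--                 for part in parts[1:]:
--                     if (
--                         part.startswith("if ")
--                         or part.startswith("elif ")
--                         or part.startswith("else:")
--                         or part.startswith("for ")
--                         or part.startswith("while ")
--                         or part.startswith("try:")
--                         or part.startswith("except ")
--                         or part.startswith("finally:")
--                     ):
--                         # Control structure - base indentation
--                         formatted_lines.append("    " + part)
--                     elif (
--                         part.startswith("return ")
--                         or part.startswith("raise ")
--                         or part.startswith("pass")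
--                     ):
--                         if formatted_lines and any(
--                             formatted_lines[-1].strip().startswith(kw)
--                             for kw in [
--                                 "if ",
--                                 "elif ",
--                                 "else:",
--                                 "for ",
--                                 "while ",
--                                 "try:",
--                                 "except ",
--                                 "finally:",
--                             ]
--                         ):
--
--                             formatted_lines.append("        " + part)
--                         else:
--                             formatted_lines.append("    " + part)
--                     else:
--                         formatted_lines.append("    " + part)
--
--             cleaned = "\n".join(formatted_lines)
--
--     return cleaned
-- ===== SOURCE B (Python) =====
-- _CONTROL = ("if ", "elif ", "else:", "for ", "while ", "try:", "except ", "finally:")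
--
--
-- def _clean_and_format_definition(definition: str) -> str:
--     """Split-and-zip reformulation: tokens come from splitting on 8-space
--     separators (strips absorb any residual run spaces), and each line's indent
--     is computed from the (previous part, part) pair instead of re-reading the
--     accumulated output."""
--     if not definition.strip():
--         raise ValueError("Empty function definition")
--
--     cleaned = definition.replace('\\"', '"').replace("\\'", "'")
--
--     if "\n" in cleaned:
--         return cleaned
--
--     parts = [q for q in (p.strip() for p in cleaned.split("        ")) if q]
--     if not parts:
--         return cleaned
--     if not parts[0].startswith("def "):
--         return ""
--
--     def indent(prev, part):
--         if part.startswith(_CONTROL):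
--             return "    "
--         if part.startswith(("return ", "raise ", "pass")) and prev.startswith(_CONTROL):
--             return "        "
--         return "    "
--
--     return "\n".join(
--         [parts[0]] + [indent(prev, part) + part for prev, part in zip(parts, parts[1:])]
--     )
-- ===== Notes on version B (the rewrite author's own statement) =====
-- stated objective: faster
-- what changed: The char-by-char scanning loop (which grows current_part by repeated string concatenation and runs an inner space-skipping loop) is replaced by a single split on the 8-space separator with strips absorbing residual run spaces, and each output line's indent is computed from the (previous part, part) pair via zip instead of re-reading the last element of the accumulated output list.
import Mathlib
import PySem

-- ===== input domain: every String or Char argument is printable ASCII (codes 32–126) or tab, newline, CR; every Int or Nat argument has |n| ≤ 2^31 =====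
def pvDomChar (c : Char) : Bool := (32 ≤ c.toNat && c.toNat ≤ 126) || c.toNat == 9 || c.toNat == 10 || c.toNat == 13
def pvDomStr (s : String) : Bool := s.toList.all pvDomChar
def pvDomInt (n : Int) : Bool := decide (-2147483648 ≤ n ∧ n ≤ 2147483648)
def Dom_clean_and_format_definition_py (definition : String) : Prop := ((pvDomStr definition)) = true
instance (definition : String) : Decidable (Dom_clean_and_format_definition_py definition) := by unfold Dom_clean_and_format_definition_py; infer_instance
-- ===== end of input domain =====

-- B replaces A's char-by-char scanning accumulator with a split-on-8-spaces pass and computes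
-- each line's indent from the (previous part, part) pair instead of re-reading the accumulated
-- output; same return value on every input A accepts (Pre_ excludes the whitespace-only inputs
-- on which A raises ValueError).

-- ===== PORT A =====
def pvSep8 : List Char := List.replicate 8 ' '    -- "        " (8 spaces)
def pvSep12 : List Char := List.replicate 12 ' '  -- "            " (12 spaces)

-- while i < len(cleaned) and cleaned[i] == " ": i += 1
def pvSkipSpaces : List Char → List Char
  | [] => []
  | c :: rest => if c = ' ' then pvSkipSpaces rest else c :: rest

-- if current_part.strip(): parts.append(current_part.strip())
def pvPush (cur : List Char) (parts : List (List Char)) : List (List Char) :=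
  if PySem.Chars.strip cur ≠ [] then parts ++ [PySem.Chars.strip cur] else parts

-- cited by pvScanA's decreasing_by
theorem pvSkipSpaces_length_le (l : List Char) : (pvSkipSpaces l).length ≤ l.length := by
  induction l with
  | nil => simp [pvSkipSpaces]
  | cons c rest ih =>
    by_cases h : c = ' '
    · simp [pvSkipSpaces, h]; omega
    · simp [pvSkipSpaces, h]

-- A's while-loop over index i, as recursion on the remaining suffix cleaned[i:]
def pvScanA : List Char → List Char → List (List Char) → List (List Char)
  | [], cur, parts => pvPush cur parts
  | c :: rest, cur, parts =>
    if List.take 8 (c :: rest) = pvSep8 then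
      pvScanA (pvSkipSpaces (List.drop 8 (c :: rest))) [] (pvPush cur parts)
    else if List.take 12 (c :: rest) = pvSep12 then
      pvScanA (pvSkipSpaces (List.drop 12 (c :: rest))) [] (pvPush cur parts)
    else
      pvScanA rest (cur ++ [c]) parts
  termination_by l _ _ => l.length
  decreasing_by
    · have := pvSkipSpaces_length_le (List.drop 8 (c :: rest)); simp at this ⊢; omega
    · have := pvSkipSpaces_length_le (List.drop 12 (c :: rest)); simp at this ⊢; omega
    · simp

-- A's explicit or-chain of startswith tests for control structures
def pvIsCtrlA (part : List Char) : Bool :=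
  PySem.Chars.startswith part "if ".toList ||
  PySem.Chars.startswith part "elif ".toList ||
  PySem.Chars.startswith part "else:".toList ||
  PySem.Chars.startswith part "for ".toList ||
  PySem.Chars.startswith part "while ".toList ||
  PySem.Chars.startswith part "try:".toList ||
  PySem.Chars.startswith part "except ".toList ||
  PySem.Chars.startswith part "finally:".toList

-- the keyword list A iterates over in `any(... for kw in [...])`
def pvKwList : List (List Char) :=
  ["if ".toList, "elif ".toList, "else:".toList, "for ".toList,
   "while ".toList, "try:".toList, "except ".toList, "finally:".toList]

-- the body of A's `for part in parts[1:]`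
def pvFormatStep (fl : List (List Char)) (part : List Char) : List (List Char) :=
  if pvIsCtrlA part then fl ++ ["    ".toList ++ part]
  else if PySem.Chars.startswith part "return ".toList ||
          PySem.Chars.startswith part "raise ".toList ||
          PySem.Chars.startswith part "pass".toList then
    if (!fl.isEmpty) &&
       pvKwList.any (fun kw => PySem.Chars.startswith (PySem.Chars.strip (fl.getLastD [])) kw) then
      fl ++ ["        ".toList ++ part]
    else fl ++ ["    ".toList ++ part]
  else fl ++ ["    ".toList ++ part]

def clean_and_format_definition_py (definition : String) : String :=
  -- A raises ValueError when definition.strip() is empty; Pre_ excludes those inputs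
  let cleaned := (PySem.Str.replace (PySem.Str.replace definition "\\\"" "\"") "\\'" "'").toList
  if PySem.Chars.isIn ['\n'] cleaned = false then
    let parts := pvScanA cleaned [] []
    if parts.isEmpty = false then
      let formattedLines :=
        if PySem.Chars.startswith (parts.headD []) "def ".toList then
          List.foldl pvFormatStep [parts.headD []] parts.tail
        else ([] : List (List Char))
      String.ofList (PySem.Chars.join ['\n'] formattedLines)
    else String.ofList cleaned
  else String.ofList cleaned

-- ===== PORT B =====
-- B's _CONTROL tuple
def pvCtrl : List (List Char) :=
  ["if ".toList, "elif ".toList, "else:".toList, "for ".toList,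
   "while ".toList, "try:".toList, "except ".toList, "finally:".toList]

-- str.startswith with a tuple of prefixes
def pvStartswithAny (s : List Char) (ps : List (List Char)) : Bool :=
  ps.any (fun p => PySem.Chars.startswith s p)

def pvIndentB (prev part : List Char) : List Char :=
  if pvStartswithAny part pvCtrl then "    ".toList
  else if pvStartswithAny part ["return ".toList, "raise ".toList, "pass".toList] &&
          pvStartswithAny prev pvCtrl then "        ".toList
  else "    ".toList

def clean_and_format_definition_py_alt (definition : String) : String :=
  -- B raises the same ValueError on whitespace-only input; Pre_ excludes those inputs
  let cleaned := (PySem.Str.replace (PySem.Str.replace definition "\\\"" "\"") "\\'" "'").toList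
  if PySem.Chars.isIn ['\n'] cleaned then String.ofList cleaned
  else
    let parts := ((PySem.Chars.splitOn cleaned ("        ".toList)).map PySem.Chars.strip).filter
      (fun q => q ≠ [])
    if parts.isEmpty then String.ofList cleaned
    else if !PySem.Chars.startswith (parts.headD []) "def ".toList then ""
    else
      String.ofList (PySem.Chars.join ['\n']
        (parts.headD [] :: (parts.zip parts.tail).map (fun pq => pvIndentB pq.1 pq.2 ++ pq.2)))

-- ===== PRECONDITION & SPEC =====
-- A (and B alike) raise ValueError exactly when definition.strip() is empty; Pre_ excludes those inputs
def Pre_clean_and_format_definition_py (definition : String) : Prop :=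
  PySem.Str.strip definition ≠ ""
instance (definition : String) : Decidable (Pre_clean_and_format_definition_py definition) := by
  unfold Pre_clean_and_format_definition_py; infer_instance

def pvWitness_clean_and_format_definition_py : String := "def f(x):        return x"

def Spec_clean_and_format_definition_py (definition : String) (out : String) : Prop := out = clean_and_format_definition_py_alt definition
instance (definition : String) (out : String) : Decidable (Spec_clean_and_format_definition_py definition out) := by unfold Spec_clean_and_format_definition_py; infer_instance

-- ===== CLAIM (what is proved, stated in full; the proofs are below) =====
def Claim_equal_clean_and_format_definition_py : Prop := ∀ (definition : String), Dom_clean_and_format_definition_py definition → Pre_clean_and_format_definition_py definition → Spec_clean_and_format_definition_py definition (clean_and_format_definition_py definition)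

-- ===== LEMMAS AND PROOFS =====

def pvSps : List Char → List (List Char)
  | [] => [[]]
  | c :: rest =>
    if pvSep8.isPrefixOf (c :: rest) then [] :: pvSps (List.drop 7 rest)
    else (c :: (pvSps rest).headD []) :: (pvSps rest).tail
  termination_by l => l.length
  decreasing_by
    · simp
    · simp

theorem pvSps_ne_nil (l : List Char) : pvSps l ≠ [] := by
  unfold pvSps; split
  · simp
  · split <;> simp

theorem pvCons_headD_tail {α : Type} (xs : List α) (d : α) (h : xs ≠ []) :
    xs.head?.getD d :: xs.tail = xs := by
  cases xs with | nil => exact absurd rfl h | cons a t => rfl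

theorem pvGo_eq (fuel : Nat) : ∀ (l cur : List Char) (acc : List (List Char)), l.length < fuel →
    PySem.Chars.splitOn.go pvSep8 fuel l cur acc
      = acc.reverse ++ (cur.reverse ++ (pvSps l).headD []) :: (pvSps l).tail := by
  induction fuel with
  | zero => intro l cur acc h; omega
  | succ n ih =>
    intro l cur acc h
    rcases l with _ | ⟨c, rest⟩
    · rw [PySem.Chars.splitOn.go] <;> simp [pvSps]
    · by_cases hp : pvSep8.isPrefixOf (c :: rest)
      · rw [PySem.Chars.splitOn.go]
        simp only [hp, if_true]
        rw [ih _ _ _ (by simp [pvSep8] at h ⊢; omega)]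
        rw [pvSps]; simp only [hp, if_true]
        have h8 : List.drop pvSep8.length (c :: rest) = List.drop 7 rest := by
          simp [pvSep8]
        rw [h8]
        simp [pvCons_headD_tail _ _ (pvSps_ne_nil (List.drop 7 rest))]
      · rw [PySem.Chars.splitOn.go]
        simp only [hp, if_false, Bool.false_eq_true]
        rw [ih _ _ _ (by simp at h ⊢; omega)]
        rw [pvSps]; simp only [hp, if_false, Bool.false_eq_true]
        simp

theorem pvSplitOn_eq (l : List Char) : PySem.Chars.splitOn l pvSep8 = pvSps l := by
  unfold PySem.Chars.splitOn
  rw [pvGo_eq (l.length + 1) l [] [] (by omega)]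
  simp [pvCons_headD_tail _ _ (pvSps_ne_nil l)]

theorem pvHead?_dropWhile {p : Char → Bool} {s : List Char} {c : Char}
    (h : (List.dropWhile p s).head? = some c) : p c = false := by
  induction s with
  | nil => simp at h
  | cons a t ih =>
    rw [List.dropWhile_cons] at h
    by_cases hp : p a
    · simp [hp] at h; exact ih h
    · simp [hp] at h; subst h; simpa using hp

theorem pvDropWhile_eq_self {p : Char → Bool} {t : List Char}
    (h : ∀ c, t.head? = some c → p c = false) : List.dropWhile p t = t := by
  cases t with
  | nil => rfl
  | cons a s => rw [List.dropWhile_cons, h a rfl]; simp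

theorem pvLstrip_spaces (k : Nat) (s : List Char) :
    PySem.Chars.lstrip (List.replicate k ' ' ++ s) = PySem.Chars.lstrip s := by
  unfold PySem.Chars.lstrip
  rw [List.dropWhile_append]
  have h : List.dropWhile PySem.Chars.isspace (List.replicate k ' ') = [] := by
    rw [List.dropWhile_eq_nil_iff]
    intro x hx
    rw [List.eq_of_mem_replicate hx]; decide
  simp [h]

theorem pvStrip_spaces (k : Nat) (s : List Char) :
    PySem.Chars.strip (List.replicate k ' ' ++ s) = PySem.Chars.strip s := by
  unfold PySem.Chars.strip
  rw [pvLstrip_spaces]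

theorem pvRstrip_prefix (t : List Char) : PySem.Chars.rstrip t <+: t := by
  unfold PySem.Chars.rstrip
  have := List.reverse_prefix.mpr (List.dropWhile_suffix (l := t.reverse) PySem.Chars.isspace)
  simpa using this

theorem pvHead?_rstrip {t : List Char} {c : Char} (h : (PySem.Chars.rstrip t).head? = some c) :
    t.head? = some c := by
  rcases pvRstrip_prefix t with ⟨u, hu⟩
  rw [← hu]
  cases hr : PySem.Chars.rstrip t with
  | nil => rw [hr] at h; simp at h
  | cons a s => rw [hr] at h; simp at h; subst h; simp

theorem pvRstrip_rstrip (t : List Char) :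
    PySem.Chars.rstrip (PySem.Chars.rstrip t) = PySem.Chars.rstrip t := by
  unfold PySem.Chars.rstrip
  rw [List.reverse_reverse, List.dropWhile_idempotent]

theorem pvLstrip_rstrip_of_head (t : List Char)
    (h : ∀ c, t.head? = some c → PySem.Chars.isspace c = false) :
    PySem.Chars.lstrip (PySem.Chars.rstrip t) = PySem.Chars.rstrip t := by
  unfold PySem.Chars.lstrip
  exact pvDropWhile_eq_self (fun c hc => h c (pvHead?_rstrip hc))

theorem pvStrip_idem (s : List Char) :
    PySem.Chars.strip (PySem.Chars.strip s) = PySem.Chars.strip s := by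
  show PySem.Chars.rstrip (PySem.Chars.lstrip (PySem.Chars.rstrip (PySem.Chars.lstrip s)))
      = PySem.Chars.rstrip (PySem.Chars.lstrip s)
  rw [pvLstrip_rstrip_of_head (PySem.Chars.lstrip s)
    (fun c hc => pvHead?_dropWhile (p := PySem.Chars.isspace) hc), pvRstrip_rstrip]

def pvSP (l : List Char) : List (List Char) :=
  ((pvSps l).map PySem.Chars.strip).filter (fun q => q ≠ [])

theorem pvSps_sep {l : List Char} (h : pvSep8.isPrefixOf l = true) :
    pvSps l = [] :: pvSps (List.drop 8 l) := by
  cases l with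
  | nil => exact absurd h (by decide)
  | cons c rest => rw [pvSps]; simp only [h, if_true, List.drop_succ_cons]

theorem pvSps_char {c : Char} {rest : List Char} (h : ¬ pvSep8 <+: (c :: rest)) :
    pvSps (c :: rest) = (c :: (pvSps rest).headD []) :: (pvSps rest).tail := by
  rw [pvSps]
  simp [List.isPrefixOf_iff_prefix, h]

theorem pvSps_small {k : Nat} (hk : k < 8) {m : List Char} (hm : m.head? ≠ some ' ') :
    pvSps (List.replicate k ' ' ++ m)
      = (List.replicate k ' ' ++ (pvSps m).headD []) :: (pvSps m).tail := by
  induction k with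
  | zero => simp [pvCons_headD_tail _ _ (pvSps_ne_nil m)]
  | succ k ih =>
    have hnp : ¬ pvSep8 <+: (' ' :: (List.replicate k ' ' ++ m)) := by
      rw [← List.cons_append, ← List.replicate_succ]
      rintro ⟨t, ht⟩
      have h1 : (List.replicate (k + 1) ' ' ++ m)[k + 1]? = m[0]? := by
        rw [List.getElem?_append_right (by simp)]; simp
      have h2 : (List.replicate (k + 1) ' ' ++ m)[k + 1]? = some ' ' := by
        rw [← ht, List.getElem?_append_left (by simp [pvSep8]; omega)]
        rw [show pvSep8 = List.replicate 8 ' ' from rfl, List.getElem?_replicate]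
        simp [hk]
      exact hm (by rw [List.head?_eq_getElem?, ← h1, h2])
    rw [List.replicate_succ, List.cons_append, pvSps_char hnp, ih (by omega)]
    simp

theorem pvSP_spaces (k : Nat) (m : List Char) (hm : m.head? ≠ some ' ') :
    pvSP (List.replicate k ' ' ++ m) = pvSP m := by
  induction k using Nat.strong_induction_on with
  | _ k ih =>
    by_cases hk : k < 8
    · rcases hsps : pvSps m with _ | ⟨hd, tl⟩
      · exact absurd hsps (pvSps_ne_nil m)
      · unfold pvSP
        rw [pvSps_small hk hm, hsps]
        simp only [List.headD_cons, List.tail_cons, List.map_cons, List.filter_cons]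
        rw [pvStrip_spaces]
    · have hk8 : k = 8 + (k - 8) := by omega
      rw [hk8, List.replicate_add, List.append_assoc]
      have hpre : pvSep8.isPrefixOf
          (List.replicate 8 ' ' ++ (List.replicate (k - 8) ' ' ++ m)) = true := by
        rw [List.isPrefixOf_iff_prefix]
        exact ⟨_, rfl⟩
      unfold pvSP
      rw [pvSps_sep hpre, List.drop_left' (by simp)]
      simp only [List.map_cons, List.filter_cons]
      have : pvSP (List.replicate (k - 8) ' ' ++ m) = pvSP m := ih (k - 8) (by omega) 
      unfold pvSP at this
      simpa [PySem.Chars.strip, PySem.Chars.lstrip, PySem.Chars.rstrip] using this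

theorem pvSkip_eq_dropWhile (m : List Char) :
    pvSkipSpaces m = List.dropWhile (fun c => c == ' ') m := by
  induction m with
  | nil => rfl
  | cons c rest ih =>
    by_cases h : c = ' ' <;> simp [pvSkipSpaces, h, ih]

theorem pvSkip_decomp (m : List Char) :
    m = List.replicate (List.takeWhile (fun c => c == ' ') m).length ' ' ++ pvSkipSpaces m := by
  have hskip := pvSkip_eq_dropWhile m
  have htake : List.takeWhile (fun c => c == ' ') m
      = List.replicate (List.takeWhile (fun c => c == ' ') m).length ' ' := by
    rw [List.eq_replicate_iff]
    refine ⟨rfl, fun b hb => ?_⟩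
    have := List.mem_takeWhile_imp hb
    simpa using this
  conv_lhs => rw [← List.takeWhile_append_dropWhile (p := fun c => c == ' ') (l := m)]
  rw [← hskip, ← htake]

theorem pvHead?_skip (m : List Char) : (pvSkipSpaces m).head? ≠ some ' ' := by
  intro h
  rw [pvSkip_eq_dropWhile] at h
  have := pvHead?_dropWhile h
  simp at this

theorem pvSP_skip (m : List Char) : pvSP (pvSkipSpaces m) = pvSP m := by
  conv_rhs => rw [pvSkip_decomp m]
  rw [pvSP_spaces _ _ (pvHead?_skip m)]

theorem pvSps_nil : pvSps [] = [[]] := by rw [pvSps]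

theorem pvSP_cons_shape (x : List Char) :
    (((([] : List Char) ++ (pvSps x).headD []) :: (pvSps x).tail).map PySem.Chars.strip).filter
      (fun q => q ≠ []) = pvSP x := by
  unfold pvSP
  rw [List.nil_append, List.headD_eq_head?_getD, pvCons_headD_tail _ _ (pvSps_ne_nil x)]

theorem pvScanA_eq (l cur : List Char) (parts : List (List Char)) :
    pvScanA l cur parts
      = parts ++ (((cur ++ (pvSps l).headD []) :: (pvSps l).tail).map PySem.Chars.strip).filter
          (fun q => q ≠ []) := by
  induction l, cur, parts using pvScanA.induct with
  | case1 cur parts =>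
    rw [pvScanA, pvSps_nil]
    by_cases h : PySem.Chars.strip cur = [] <;> simp [pvPush, h]
  | case2 c rest cur parts h8 ih =>
    have hpre : pvSep8.isPrefixOf (c :: rest) = true := by
      rw [List.isPrefixOf_iff_prefix, List.prefix_iff_eq_take]
      rw [show pvSep8.length = 8 from rfl]
      exact h8.symm
    rw [pvScanA]
    simp only [h8, if_true]
    rw [ih, pvSP_cons_shape, pvSP_skip, pvSps_sep hpre]
    simp only [List.headD_cons, List.tail_cons, List.map_cons, List.filter_cons,
      List.append_nil]
    by_cases h : PySem.Chars.strip cur = [] <;> simp [pvPush, pvSP, h]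
  | case3 c rest cur parts h8 h12 ih =>
    exfalso
    apply h8
    calc List.take 8 (c :: rest) = List.take 8 (List.take 12 (c :: rest)) := by
          rw [List.take_take]; norm_num
      _ = List.take 8 pvSep12 := by rw [h12]
      _ = pvSep8 := by rfl
  | case4 c rest cur parts h8 h12 ih =>
    have hnp : ¬ pvSep8 <+: (c :: rest) := by
      intro hp
      rw [List.prefix_iff_eq_take] at hp
      exact h8 hp.symm
    rw [pvScanA]
    simp only [h8, h12, if_false]
    rw [ih, pvSps_char hnp]
    simp

theorem pvParts_eq (l : List Char) : pvScanA l [] [] = pvSP l := by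
  rw [pvScanA_eq, pvSP_cons_shape, List.nil_append]

theorem pvCtrl_eq (p : List Char) : pvIsCtrlA p = pvStartswithAny p pvCtrl := by
  simp [pvIsCtrlA, pvStartswithAny, pvCtrl, Bool.or_assoc]

theorem pvStrip_indentB (p q r : List Char) (hr : PySem.Chars.strip r = r) :
    PySem.Chars.strip (pvIndentB p q ++ r) = r := by
  unfold pvIndentB
  split_ifs <;>
    first
    | rw [show "    ".toList = List.replicate 4 ' ' from by decide, pvStrip_spaces, hr]
    | rw [show "        ".toList = List.replicate 8 ' ' from by decide, pvStrip_spaces, hr]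

theorem pvFmt (rest : List (List Char)) : ∀ (L : List (List Char)) (prev : List Char),
    L ≠ [] → PySem.Chars.strip (L.getLastD []) = prev →
    (∀ p ∈ rest, PySem.Chars.strip p = p) →
    List.foldl pvFormatStep L rest
      = L ++ ((prev :: rest).zip rest).map (fun pq => pvIndentB pq.1 pq.2 ++ pq.2) := by
  induction rest with
  | nil => intro L prev _ _ _; simp
  | cons r rs ih =>
    intro L prev hL hlast hst
    have hstep : pvFormatStep L r = L ++ [pvIndentB prev r ++ r] := by
      unfold pvFormatStep pvIndentB
      rw [pvCtrl_eq, hlast]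
      have hne : (!L.isEmpty) = true := by simp [hL]
      by_cases h1 : pvStartswithAny r pvCtrl
      · simp [h1]
      · simp only [h1, if_false, Bool.false_eq_true]
        by_cases h2 : (PySem.Chars.startswith r "return ".toList ||
            PySem.Chars.startswith r "raise ".toList ||
            PySem.Chars.startswith r "pass".toList) = true
        · have h2' : pvStartswithAny r ["return ".toList, "raise ".toList, "pass".toList]
              = true := by
            simp [pvStartswithAny] at h2 ⊢; tauto
          simp only [h2, h2', if_true, hne, Bool.true_and]
          have hkw : pvKwList.any (fun kw => PySem.Chars.startswith prev kw)
              = pvStartswithAny prev pvCtrl := rfl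
          rw [hkw]
          by_cases h3 : pvStartswithAny prev pvCtrl <;> simp [h3]
        · have h2' : pvStartswithAny r ["return ".toList, "raise ".toList, "pass".toList]
              = false := by
            simp [pvStartswithAny] at h2 ⊢; tauto
          rw [Bool.not_eq_true] at h2
          simp only [Bool.or_eq_false_iff] at h2
          have ha : PySem.Chars.startswith r ['r', 'e', 't', 'u', 'r', 'n', ' '] = false := h2.1.1
          have hb : PySem.Chars.startswith r ['r', 'a', 'i', 's', 'e', ' '] = false := h2.1.2
          have hc : PySem.Chars.startswith r ['p', 'a', 's', 's'] = false := h2.2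
          have hd : pvStartswithAny r
              [['r', 'e', 't', 'u', 'r', 'n', ' '], ['r', 'a', 'i', 's', 'e', ' '],
               ['p', 'a', 's', 's']] = false := h2'
          simp [ha, hb, hc, hd]
    rw [List.foldl_cons, hstep,
      ih (L ++ [pvIndentB prev r ++ r]) r (by simp)
        (by rw [List.getLastD_concat]
            exact pvStrip_indentB prev r r (hst r (by simp)))
        (fun p hp => hst p (by simp [hp]))]
    simp [List.zip_cons_cons]

theorem pvSP_stripped (l : List Char) : ∀ p ∈ pvSP l, PySem.Chars.strip p = p := by
  intro p hp
  unfold pvSP at hp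
  rw [List.mem_filter] at hp
  rcases List.mem_map.mp hp.1 with ⟨q, _, rfl⟩
  exact pvStrip_idem q

theorem pv_main (definition : String) :
    clean_and_format_definition_py definition = clean_and_format_definition_py_alt definition := by
  unfold clean_and_format_definition_py clean_and_format_definition_py_alt
  set cleaned := (PySem.Str.replace (PySem.Str.replace definition "\\\"" "\"") "\\'" "'").toList
    with hcl
  clear_value cleaned
  by_cases hin : PySem.Chars.isIn ['\n'] cleaned
  · simp [hin]
  · simp only [hin, Bool.not_eq_true, if_true, if_false, eq_self_iff_true]
    have hsep : "        ".toList = pvSep8 := by decide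
    rw [pvParts_eq, hsep, pvSplitOn_eq]
    have hBparts : ((pvSps cleaned).map PySem.Chars.strip).filter (fun q => q ≠ [])
        = pvSP cleaned := rfl
    rw [hBparts]
    rcases hP : pvSP cleaned with _ | ⟨p0, ps⟩
    · simp
    · have hp0 : PySem.Chars.strip p0 = p0 :=
        pvSP_stripped cleaned p0 (by rw [hP]; exact List.mem_cons_self)
      by_cases hdef : PySem.Chars.startswith p0 "def ".toList
      · simp only [List.isEmpty_cons, List.headD_cons, List.tail_cons, hdef, if_true,
          Bool.not_true, if_false]
        rw [pvFmt ps [p0] p0 (by simp) (by simpa using hp0)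
          (fun p hp => pvSP_stripped cleaned p (by rw [hP]; exact List.mem_cons_of_mem _ hp))]
        simp
      · have hdef' : PySem.Chars.startswith p0 ['d', 'e', 'f', ' '] = false := by
          rw [← Bool.not_eq_true]; exact hdef
        simp [hdef', PySem.Chars.join, List.intercalate]

-- ===== VERDICT (by name: the statement is the Claim_ definition above) =====
theorem clean_and_format_definition_py_spec : Claim_equal_clean_and_format_definition_py := by
  intro definition _ _
  unfold Spec_clean_and_format_definition_py
  exact pv_main definition
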